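-- pv_equiv track=rewrite | github.com/julianbopp/cbct-artifact-reduction | src/cbct_artifact_reduction/utils.py | getAllx800IDs
-- ===== SOURCE A (Python) =====
-- def get_scanner_from_num(num: int):
--     orig_num = num
--     scanner = ""
--     material = ""
--     implants = ""
--     fov = ""
--
--     if ((num - 1) // 20) % 4 == 0:
--         scanner = "axeos"
--     elif ((num - 1) // 20) % 4 == 1:
--         scanner = "accuitomo"
--     elif ((num - 1) // 20) % 4 == 2:
--         scanner = "planmeca"
--     elif ((num - 1) // 20) % 4 == 3:
--         scanner = "x800"
--
--     if num % 10 == 0: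
--         material = ""
--         implants = 0
--     elif (num % 10) % 3 == 1:
--         implants = 3
--     elif (num % 10) % 3 == 2:
--         implants = 2
--     elif (num % 10) % 3 == 0:
--         implants = 1
--
--     if ((num - 1) % 10) // 3 == 0:
--         material = "ti"
--     elif ((num - 1) % 10) // 3 == 1:
--         material = "tizr"
--     elif ((num - 1) % 10) // 3 == 2:
--         material = "zr"
--
--     if ((num - 1) // 10) % 2 == 0:
--         fov = "small"
--     elif ((num - 1) // 10) % 2 == 1:
--         fov = "large"
--
--     return orig_num, scanner, material, implants, fov
--
-- def getAllx800IDs(exludeIDs: list[int] | None = [41, 208]) -> list[str]: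
--     """Find all scan ID's that correspond to x800 images in the CBCT pig jaw data.
--
--     The CBCT pig jaw dataset consists of 398 scans. The scans with the ID's 41 and 208 are missing.
--
--     Args:
--         exludeIDs (list[int], optional): List of scan ID's to exclude. Defaults to missing ID's of CBCT pig jaw data.
--     Returns:
--         list[str]: List of scan ID's that correspond to x800 images.
--     """
--
--     if exludeIDs is None:
--         possibleIDs = [f"{f}" for f in range(1, 401)]
--     else:
--         possibleIDs = [f"{f}" for f in range(1, 401) if f not in exludeIDs]
--
--     x800IDs: list[str] = []
--     for id in possibleIDs:
--         scanner = get_scanner_from_num(int(id))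
--         if scanner[1] == "x800":
--             x800IDs.append(id)
--
--     return x800IDs
-- ===== SOURCE B (Python) =====
-- def getAllx800IDs(exludeIDs=[41, 208]):
--     """Generate the five x800 blocks (20 consecutive IDs starting at 61, 141, 221,
--     301, 381) directly, instead of scanning all 400 IDs through a classifier."""
--     candidates = [s + i for s in (61, 141, 221, 301, 381) for i in range(20)]
--     if exludeIDs is not None:
--         candidates = [f for f in candidates if f not in exludeIDs]
--     return [str(f) for f in candidates]
-- ===== Notes on version B (the rewrite author's own statement) =====
-- stated objective: faster
-- what changed: B constructs the five 20-ID x800 blocks (starts 61,141,221,301,381) directly by arithmetic and then filters/stringifies, instead of scanning all 400 IDs, formatting each to a string, re-parsing it with int() and running the full scanner classifier on each.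
import Mathlib
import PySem

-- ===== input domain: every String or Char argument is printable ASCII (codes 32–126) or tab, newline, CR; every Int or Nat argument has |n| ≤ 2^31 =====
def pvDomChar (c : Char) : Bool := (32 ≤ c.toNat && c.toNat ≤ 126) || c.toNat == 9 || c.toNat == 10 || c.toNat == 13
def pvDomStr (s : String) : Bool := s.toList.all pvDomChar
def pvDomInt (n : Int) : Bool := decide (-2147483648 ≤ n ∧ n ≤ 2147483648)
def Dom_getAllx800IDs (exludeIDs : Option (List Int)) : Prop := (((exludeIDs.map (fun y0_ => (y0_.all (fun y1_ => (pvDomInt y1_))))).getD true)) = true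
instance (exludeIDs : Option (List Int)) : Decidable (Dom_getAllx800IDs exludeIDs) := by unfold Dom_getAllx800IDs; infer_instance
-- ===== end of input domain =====

set_option maxRecDepth 8000

-- B builds the five 20-ID x800 blocks directly by arithmetic instead of scanning all
-- 400 IDs through string formatting, int() re-parsing and the full scanner classifier.

-- ===== PORT A =====
def get_scanner_from_num (num : Int) : Int × String × String × Int × String :=
  let orig_num := num
  -- the trailing `else` branches return the Python initial value ("" / the untouched variable);
  -- the implants chain is exhaustive in Python, the `else 0` there is unreachable
  let scanner : String :=
    if PySem.Int.mod (PySem.Int.floordiv (num - 1) 20) 4 == 0 then "axeos"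
    else if PySem.Int.mod (PySem.Int.floordiv (num - 1) 20) 4 == 1 then "accuitomo"
    else if PySem.Int.mod (PySem.Int.floordiv (num - 1) 20) 4 == 2 then "planmeca"
    else if PySem.Int.mod (PySem.Int.floordiv (num - 1) 20) 4 == 3 then "x800"
    else ""
  let material0 : String := ""
  let material1 : String := if PySem.Int.mod num 10 == 0 then "" else material0
  let implants : Int :=
    if PySem.Int.mod num 10 == 0 then 0
    else if PySem.Int.mod (PySem.Int.mod num 10) 3 == 1 then 3
    else if PySem.Int.mod (PySem.Int.mod num 10) 3 == 2 then 2
    else if PySem.Int.mod (PySem.Int.mod num 10) 3 == 0 then 1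
    else 0
  let material : String :=
    if PySem.Int.floordiv (PySem.Int.mod (num - 1) 10) 3 == 0 then "ti"
    else if PySem.Int.floordiv (PySem.Int.mod (num - 1) 10) 3 == 1 then "tizr"
    else if PySem.Int.floordiv (PySem.Int.mod (num - 1) 10) 3 == 2 then "zr"
    else material1
  let fov : String :=
    if PySem.Int.mod (PySem.Int.floordiv (num - 1) 10) 2 == 0 then "small"
    else if PySem.Int.mod (PySem.Int.floordiv (num - 1) 10) 2 == 1 then "large"
    else ""
  (orig_num, scanner, material, implants, fov)

def getAllx800IDs (exludeIDs : Option (List Int)) : List String :=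
  let possibleIDs : List String :=
    match exludeIDs with
    | none => (PySem.List.pyRange 1 401 1).map (fun f => PySem.Int.toStr f)
    | some l => ((PySem.List.pyRange 1 401 1).filter (fun f => !l.contains f)).map (fun f => PySem.Int.toStr f)
  possibleIDs.foldl (fun x800IDs id =>
    -- int(id): every id is a plain decimal literal, so int() never raises; getD 0 is unreachable
    let scanner := get_scanner_from_num ((PySem.Int.ofStr? id).getD 0)
    if scanner.2.1 == "x800" then x800IDs ++ [id] else x800IDs) []

-- ===== PORT B =====
def getAllx800IDs_alt (exludeIDs : Option (List Int)) : List String :=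
  let candidates : List Int :=
    ([61, 141, 221, 301, 381] : List Int).flatMap
      (fun s => (PySem.List.pyRange 0 20 1).map (fun i => s + i))
  let candidates2 : List Int :=
    match exludeIDs with
    | none => candidates
    | some l => candidates.filter (fun f => !l.contains f)
  candidates2.map (fun f => PySem.Int.toStr f)

-- ===== PRECONDITION & SPEC =====
def Spec_getAllx800IDs (exludeIDs : Option (List Int)) (out : List String) : Prop := out = getAllx800IDs_alt exludeIDs
instance (exludeIDs : Option (List Int)) (out : List String) : Decidable (Spec_getAllx800IDs exludeIDs out) := by unfold Spec_getAllx800IDs; infer_instance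

-- ===== CLAIM (what is proved, stated in full; the proofs are below) =====
def Claim_equal_getAllx800IDs : Prop := ∀ (exludeIDs : Option (List Int)), Dom_getAllx800IDs exludeIDs → Spec_getAllx800IDs exludeIDs (getAllx800IDs exludeIDs)

-- ===== LEMMAS AND PROOFS =====

-- str(n) parsed back by int() gives n, for every n the range produces
theorem pv_roundtrip : ∀ n ∈ PySem.List.pyRange 1 401 1,
    (PySem.Int.ofStr? (PySem.Int.toStr n)).getD 0 = n := by decide

-- A's scanner field equals "x800" exactly when the arithmetic block test fires
theorem pv_scanner (n : Int) :
    ((get_scanner_from_num n).2.1 == "x800")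
      = (PySem.Int.mod (PySem.Int.floordiv (n - 1) 20) 4 == 3) := by
  unfold get_scanner_from_num
  have h0 : (0:Int) ≤ PySem.Int.mod (PySem.Int.floordiv (n - 1) 20) 4 :=
    PySem.Int.mod_nonneg _ (by norm_num)
  have h4 : PySem.Int.mod (PySem.Int.floordiv (n - 1) 20) 4 < 4 :=
    PySem.Int.mod_lt _ (by norm_num)
  set m := PySem.Int.mod (PySem.Int.floordiv (n - 1) 20) 4 with hm
  interval_cases m <;> simp

-- the IDs of 1..400 passing the block test are exactly B's five blocks
theorem pv_blocks :
    (PySem.List.pyRange 1 401 1).filter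
        (fun f => PySem.Int.mod (PySem.Int.floordiv (f - 1) 20) 4 == 3)
      = ([61, 141, 221, 301, 381] : List Int).flatMap
          (fun s => (PySem.List.pyRange 0 20 1).map (fun i => s + i)) := by decide

theorem pv_pointwise :
    ∀ n ∈ PySem.List.pyRange 1 401 1,
      ((get_scanner_from_num ((PySem.Int.ofStr? (PySem.Int.toStr n)).getD 0)).2.1 == "x800")
        = (PySem.Int.mod (PySem.Int.floordiv (n - 1) 20) 4 == 3) := by
  intro n hn
  rw [pv_roundtrip n hn, pv_scanner]

-- A's loop over a list of stringified range elements, reduced to an Int-level filter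
theorem pv_A_shape (e : Int → Bool) :
    (((PySem.List.pyRange 1 401 1).filter e).map (fun f => PySem.Int.toStr f)).filter
        (fun id => (get_scanner_from_num ((PySem.Int.ofStr? id).getD 0)).2.1 == "x800")
      = (((PySem.List.pyRange 1 401 1).filter
            (fun f => PySem.Int.mod (PySem.Int.floordiv (f - 1) 20) 4 == 3)).filter e).map
          (fun f => PySem.Int.toStr f) := by
  rw [List.filter_map, List.filter_filter, List.filter_filter]
  congr 1
  apply List.filter_congr
  intro n hn
  simp only [Function.comp]
  rw [pv_pointwise n hn, Bool.and_comm]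

theorem getAllx800IDs_eq_alt (exludeIDs : Option (List Int)) :
    getAllx800IDs exludeIDs = getAllx800IDs_alt exludeIDs := by
  cases exludeIDs with
  | none =>
      show ((PySem.List.pyRange 1 401 1).map (fun f => PySem.Int.toStr f)).foldl
              (fun x800IDs id =>
                if (get_scanner_from_num ((PySem.Int.ofStr? id).getD 0)).2.1 == "x800"
                then x800IDs ++ [id] else x800IDs) []
          = (([61, 141, 221, 301, 381] : List Int).flatMap
              (fun s => (PySem.List.pyRange 0 20 1).map (fun i => s + i))).map
              (fun f => PySem.Int.toStr f)
      rw [PySem.List.foldl_append_if_eq_filter, ← pv_blocks]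
      have h := pv_A_shape (fun _ => true)
      simp only [List.filter_true] at h
      simpa using h
  | some l =>
      show (((PySem.List.pyRange 1 401 1).filter (fun f => !l.contains f)).map
              (fun f => PySem.Int.toStr f)).foldl
              (fun x800IDs id =>
                if (get_scanner_from_num ((PySem.Int.ofStr? id).getD 0)).2.1 == "x800"
                then x800IDs ++ [id] else x800IDs) []
          = ((([61, 141, 221, 301, 381] : List Int).flatMap
                (fun s => (PySem.List.pyRange 0 20 1).map (fun i => s + i))).filter
                (fun f => !l.contains f)).map (fun f => PySem.Int.toStr f)
      rw [PySem.List.foldl_append_if_eq_filter, ← pv_blocks]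
      simpa using pv_A_shape (fun f => !l.contains f)

-- ===== VERDICT (by name: the statement is the Claim_ definition above) =====
theorem getAllx800IDs_spec : Claim_equal_getAllx800IDs := by
  intro ex _
  unfold Spec_getAllx800IDs
  exact getAllx800IDs_eq_alt ex
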